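-- pv_equiv track=rewrite | github.com/jrheard/advent_2020 | day_16.py | find_invalid_value_in_ticket
-- ===== SOURCE A (Python) =====
-- FieldRanges = dict[str, tuple[tuple[int, int], tuple[int, int]]]
--
-- def find_invalid_value_in_ticket(ticket: tuple[int], field_ranges: FieldRanges) -> int:
--     for field_value in ticket:
--         value_is_valid_for_any_field = False
--         for range_1, range_2 in field_ranges.values():
--             if (
--                 range_1[0] <= field_value <= range_1[1]
--                 or range_2[0] <= field_value <= range_2[1]
--             ):
--                 value_is_valid_for_any_field = True
--
--         if not value_is_valid_for_any_field:
--             return field_value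
--
--     return 0
-- ===== SOURCE B (Python) =====
-- def find_invalid_value_in_ticket(ticket, field_ranges):
--     # Merge all field ranges into sorted disjoint intervals once,
--     # then scan each ticket value against them with early exit.
--     intervals = sorted(
--         (r for pair in field_ranges.values() for r in pair),
--         key=lambda r: r[0],
--     )
--     merged = []
--     if intervals:
--         cur_lo, cur_hi = intervals[0]
--         for lo, hi in intervals[1:]:
--             if lo <= cur_hi:
--                 if hi > cur_hi:
--                     cur_hi = hi
--             else:
--                 merged.append((cur_lo, cur_hi))
--                 cur_lo, cur_hi = lo, hi
--         merged.append((cur_lo, cur_hi))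
--     for v in ticket:
--         covered = False
--         for lo, hi in merged:
--             if lo > v:
--                 break
--             if v <= hi:
--                 covered = True
--                 break
--         if not covered:
--             return v
--     return 0
-- ===== Notes on version B (the rewrite author's own statement) =====
-- stated objective: alternative
-- what changed: B first merges all field ranges once into lo-sorted disjoint intervals and then checks each ticket value by an early-exit scan of the merged intervals, instead of A's full rescan of every range pair for every value.
import Mathlib
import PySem

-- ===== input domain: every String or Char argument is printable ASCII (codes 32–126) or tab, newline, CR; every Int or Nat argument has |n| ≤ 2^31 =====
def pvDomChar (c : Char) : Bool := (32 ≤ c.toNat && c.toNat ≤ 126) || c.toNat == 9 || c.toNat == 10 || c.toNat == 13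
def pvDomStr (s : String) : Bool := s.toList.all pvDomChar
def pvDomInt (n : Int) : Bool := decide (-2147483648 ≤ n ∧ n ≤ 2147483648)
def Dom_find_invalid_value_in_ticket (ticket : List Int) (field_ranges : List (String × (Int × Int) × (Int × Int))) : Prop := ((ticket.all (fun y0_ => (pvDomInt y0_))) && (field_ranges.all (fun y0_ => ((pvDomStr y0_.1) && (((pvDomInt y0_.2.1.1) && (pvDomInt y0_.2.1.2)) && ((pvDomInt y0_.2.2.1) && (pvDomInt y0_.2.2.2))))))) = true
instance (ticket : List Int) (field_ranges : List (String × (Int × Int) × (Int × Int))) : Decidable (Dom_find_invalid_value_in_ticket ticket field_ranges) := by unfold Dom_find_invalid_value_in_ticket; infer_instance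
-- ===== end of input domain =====

-- B merges the field ranges once into lo-sorted disjoint intervals and scans each
-- ticket value against them with early exit, instead of A's full rescan of every
-- range pair per value (objective: alternative).


-- ===== PORT A =====
-- inner for-loop over field_ranges.values(): flag starts False, set True when a range matches
def pvValidA (v : Int) (frs : List (String × (Int × Int) × (Int × Int))) : Bool :=
  frs.foldl (fun flag f =>
    if (f.2.1.1 ≤ v ∧ v ≤ f.2.1.2) ∨ (f.2.2.1 ≤ v ∧ v ≤ f.2.2.2) then true else flag) false

-- outer for-loop over ticket with early return, fall-through returns 0
def pvLoopA (frs : List (String × (Int × Int) × (Int × Int))) : List Int → Int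
  | [] => 0
  | v :: rest => if !(pvValidA v frs) then v else pvLoopA frs rest

def find_invalid_value_in_ticket (ticket : List Int) (field_ranges : List (String × (Int × Int) × (Int × Int))) : Int :=
  pvLoopA field_ranges ticket

-- ===== PORT B =====
-- merge loop over intervals[1:], state (cur_lo, cur_hi), flushing cur on a gap
def pvMerge : List (Int × Int) → Int → Int → List (Int × Int)
  | [], clo, chi => [(clo, chi)]
  | (lo, hi) :: rest, clo, chi =>
      if lo ≤ chi then pvMerge rest clo (if hi > chi then hi else chi)
      else (clo, chi) :: pvMerge rest lo hi

-- inner scan with early break: stop as soon as lo > v (intervals are lo-sorted)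
def pvCovered (v : Int) : List (Int × Int) → Bool
  | [] => false
  | (lo, hi) :: rest => if lo > v then false else if v ≤ hi then true else pvCovered v rest

def pvFirstInvalid (merged : List (Int × Int)) : List Int → Int
  | [] => 0
  | v :: rest => if pvCovered v merged then pvFirstInvalid merged rest else v

def find_invalid_value_in_ticket_alt (ticket : List Int) (field_ranges : List (String × (Int × Int) × (Int × Int))) : Int :=
  let intervals := PySem.List.sorted (field_ranges.flatMap (fun p => [p.2.1, p.2.2])) (fun r => r.1) false
  let merged := match intervals with
    | [] => ([] : List (Int × Int))
    | (lo, hi) :: rest => pvMerge rest lo hi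
  pvFirstInvalid merged ticket

-- ===== PRECONDITION & SPEC =====
def Spec_find_invalid_value_in_ticket (ticket : List Int) (field_ranges : List (String × (Int × Int) × (Int × Int))) (out : Int) : Prop := out = find_invalid_value_in_ticket_alt ticket field_ranges
instance (ticket : List Int) (field_ranges : List (String × (Int × Int) × (Int × Int))) (out : Int) : Decidable (Spec_find_invalid_value_in_ticket ticket field_ranges out) := by unfold Spec_find_invalid_value_in_ticket; infer_instance

-- ===== CLAIM (what is proved, stated in full; the proofs are below) =====
def Claim_equal_find_invalid_value_in_ticket : Prop := ∀ (ticket : List Int) (field_ranges : List (String × (Int × Int) × (Int × Int))), Dom_find_invalid_value_in_ticket ticket field_ranges → Spec_find_invalid_value_in_ticket ticket field_ranges (find_invalid_value_in_ticket ticket field_ranges)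

-- ===== LEMMAS AND PROOFS =====

-- plain "some interval contains v" predicate, the common reference point
def pvCov (v : Int) (l : List (Int × Int)) : Bool := l.any (fun r => decide (r.1 ≤ v ∧ v ≤ r.2))

lemma foldA_eq (v : Int) (frs : List (String × (Int × Int) × (Int × Int))) (b : Bool) :
    frs.foldl (fun flag f =>
      if (f.2.1.1 ≤ v ∧ v ≤ f.2.1.2) ∨ (f.2.2.1 ≤ v ∧ v ≤ f.2.2.2) then true else flag) b
    = (b || pvCov v (frs.flatMap (fun p => [p.2.1, p.2.2]))) := by
  induction frs generalizing b with
  | nil => simp [pvCov]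
  | cons f rest ih =>
      simp only [List.foldl_cons, ih]
      by_cases h1 : f.2.1.1 ≤ v ∧ v ≤ f.2.1.2 <;> by_cases h2 : f.2.2.1 ≤ v ∧ v ≤ f.2.2.2 <;>
        simp [pvCov, h1, h2, -Bool.decide_and]

lemma validA_eq_cov (v : Int) (frs : List (String × (Int × Int) × (Int × Int))) :
    pvValidA v frs = pvCov v (frs.flatMap (fun p => [p.2.1, p.2.2])) := by
  unfold pvValidA
  rw [foldA_eq]
  simp

-- every interval starts strictly right of v ⇒ nothing covers v
lemma cov_false_of_lt (v : Int) (l : List (Int × Int)) (h : ∀ p ∈ l, v < p.1) :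
    pvCov v l = false := by
  simp only [pvCov, List.any_eq_false]
  rintro ⟨a, b⟩ hmem
  have := h _ hmem
  simp only [decide_eq_true_eq, not_and]
  intro h1
  omega

-- core: scan-with-break over the merged intervals = membership in any input interval
lemma covered_merge (v : Int) (ints : List (Int × Int)) (clo chi : Int)
    (hs : ints.Pairwise (fun a b => a.1 ≤ b.1))
    (hlo : ∀ p ∈ ints, clo ≤ p.1) :
    pvCovered v (pvMerge ints clo chi) = pvCov v ((clo, chi) :: ints) := by
  induction ints generalizing clo chi with
  | nil =>
      simp only [pvMerge, pvCovered, pvCov, List.any_cons, List.any_nil]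
      split_ifs <;> simp <;> omega
  | cons p rest ih =>
      obtain ⟨lo, hi⟩ := p
      have hclo : clo ≤ lo := hlo _ (List.mem_cons_self ..)
      have hrest : ∀ q ∈ rest, lo ≤ q.1 := fun q hq => (List.pairwise_cons.mp hs).1 q hq
      simp only [pvMerge]
      by_cases hle : lo ≤ chi
      · -- lo ≤ chi : extend the current interval
        rw [if_pos hle, ih clo (if hi > chi then hi else chi) hs.tail
            (fun q hq => le_trans hclo (hrest q hq))]
        have key : (clo ≤ v ∧ v ≤ (if hi > chi then hi else chi))
            ↔ ((clo ≤ v ∧ v ≤ chi) ∨ (lo ≤ v ∧ v ≤ hi)) := by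
          split_ifs <;> omega
        simp only [pvCov, List.any_cons, key, Bool.decide_or, Bool.or_assoc]
      · -- chi < lo : flush (clo, chi) and start a new interval
        rw [if_neg hle]
        simp only [pvCovered]
        split_ifs with hv1 hv2
        · -- clo > v : every interval starts right of v
          symm
          refine cov_false_of_lt v _ ?_
          rintro ⟨a, b⟩ hmem
          rcases List.mem_cons.mp hmem with heq | hmem'
          · cases heq; omega
          · rcases List.mem_cons.mp hmem' with heq | hmem''
            · cases heq; omega
            · have := hrest _ hmem''; simp_all; omega
        · -- clo ≤ v ≤ chi : the head interval covers v
          have : clo ≤ v ∧ v ≤ chi := ⟨by omega, hv2⟩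
          simp [pvCov, this]
        · -- v beyond (clo, chi) : recurse on the freshly started interval
          rw [ih lo hi hs.tail hrest]
          have hnot : ¬ (clo ≤ v ∧ v ≤ chi) := by omega
          simp [pvCov, hnot]

lemma alt_covered (v : Int) (frs : List (String × (Int × Int) × (Int × Int))) :
    (match PySem.List.sorted (frs.flatMap (fun p => [p.2.1, p.2.2])) (fun r => r.1) false with
      | [] => pvCovered v ([] : List (Int × Int))
      | (lo, hi) :: rest => pvCovered v (pvMerge rest lo hi)) = pvValidA v frs := by
  rw [validA_eq_cov]
  have hperm := PySem.List.sorted_perm (xs := frs.flatMap (fun p => [p.2.1, p.2.2]))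
      (key := fun r => r.1) (rev := false)
  have hpw := PySem.List.sorted_pairwise (xs := frs.flatMap (fun p => [p.2.1, p.2.2]))
      (key := fun r => r.1)
  cases h : PySem.List.sorted (frs.flatMap (fun p => [p.2.1, p.2.2])) (fun r => r.1) false with
  | nil =>
      rw [h] at hperm
      have hnil : frs.flatMap (fun p => [p.2.1, p.2.2]) = [] := hperm.symm.eq_nil
      simp [pvCovered, pvCov, hnil]
  | cons p t =>
      obtain ⟨lo, hi⟩ := p
      rw [h] at hperm hpw
      show pvCovered v (pvMerge t lo hi) = _
      rw [covered_merge v t lo hi hpw.tail (fun q hq => (List.pairwise_cons.mp hpw).1 q hq)]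
      exact List.Perm.any_eq hperm

lemma main_eq (frs : List (String × (Int × Int) × (Int × Int))) (ticket : List Int) :
    find_invalid_value_in_ticket ticket frs = find_invalid_value_in_ticket_alt ticket frs := by
  unfold find_invalid_value_in_ticket find_invalid_value_in_ticket_alt
  induction ticket with
  | nil =>
      cases h : PySem.List.sorted (frs.flatMap (fun p => [p.2.1, p.2.2])) (fun r => r.1) false <;>
        simp [pvLoopA, pvFirstInvalid]
  | cons v rest ih =>
      have hc := alt_covered v frs
      cases h : PySem.List.sorted (frs.flatMap (fun p => [p.2.1, p.2.2])) (fun r => r.1) false with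
      | nil =>
          rw [h] at hc; simp only [h] at ih ⊢
          simp only [pvLoopA, pvFirstInvalid, ← hc]
          simp [pvCovered]
      | cons p t =>
          obtain ⟨lo, hi⟩ := p
          rw [h] at hc; simp only [h] at ih ⊢
          simp only [pvLoopA, pvFirstInvalid, ← hc]
          cases pvCovered v (pvMerge t lo hi)
          · simp
          · simp [ih]

-- ===== VERDICT (by name: the statement is the Claim_ definition above) =====
theorem find_invalid_value_in_ticket_spec : Claim_equal_find_invalid_value_in_ticket := by
  intro ticket frs _
  exact main_eq frs ticket
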